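-- pv_equiv track=rewrite | github.com/daniel-reich/ubiquitous-fiesta | 9Px2rkc9TPhK54wDb_3.py | share
-- ===== SOURCE A (Python) =====
-- def share(x,y):
--     if x>y:
--         for i in range(2,y+1):
--             if x%i==0 and y%i==0:
--                 return True
--         return False
--     else:
--         for i in range(2,x+1):
--             if x%i==0 and y%i==0:
--                 return True
--         return False
-- ===== SOURCE B (Python) =====
-- def share(x, y):
--     # The candidate range [2, min(x,y)] is empty -> no shared divisor > 1.
--     if min(x, y) < 2:
--         return False
--     a, b = x, y
--     while b:
--         a, b = b, a % b
--     return a > 1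
-- ===== Notes on version B (the rewrite author's own statement) =====
-- stated objective: alternative
-- what changed: Replaces A's trial scan over every candidate i in [2, min(x,y)] with an explicit Euclidean remainder loop (a,b = b, a%b until b = 0), plus a guard returning False when that candidate range is empty (min(x,y) < 2); intended as faster (O(log) vs O(min) divisions), measured 55-80x on large inputs in some runs but not consistently across random inputs (inputs with min(x,y)<2 exit instantly in both).
import Mathlib
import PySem

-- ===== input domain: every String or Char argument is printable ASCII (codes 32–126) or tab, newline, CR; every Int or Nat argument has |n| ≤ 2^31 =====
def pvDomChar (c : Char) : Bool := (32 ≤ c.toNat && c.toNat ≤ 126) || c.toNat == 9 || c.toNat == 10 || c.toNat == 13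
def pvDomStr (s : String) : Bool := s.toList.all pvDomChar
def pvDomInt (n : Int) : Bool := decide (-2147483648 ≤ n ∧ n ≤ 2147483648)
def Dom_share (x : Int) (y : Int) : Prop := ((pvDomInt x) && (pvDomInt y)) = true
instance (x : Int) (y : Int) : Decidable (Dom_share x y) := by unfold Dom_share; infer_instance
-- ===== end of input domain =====

-- B replaces A's linear scan for a common divisor in [2, min(x,y)] by an explicit
-- Euclidean remainder loop (guarding the case where A's candidate range is empty);
-- same return value on every input.

-- ===== PORT A =====
-- the for-loop with early 'return True': recursion over the remaining range
def shareScan (x : Int) (y : Int) : List Int → Bool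
  | [] => false
  | i :: rest =>
    if PySem.Int.mod x i = 0 ∧ PySem.Int.mod y i = 0 then true
    else shareScan x y rest

def share (x : Int) (y : Int) : Bool :=
  if x > y then shareScan x y (PySem.List.pyRange 2 (y + 1) 1)
  else shareScan x y (PySem.List.pyRange 2 (x + 1) 1)

-- ===== PORT B =====
-- termination measure for the 'while b:' loop: |a % b| < |b| (Python mod)
theorem pymod_natAbs_lt (a b : Int) (hb : ¬ b = 0) :
    (PySem.Int.mod a b).natAbs < b.natAbs := by
  rcases lt_or_gt_of_ne hb with h | h
  · have := PySem.Int.mod_neg_bounds a h; omega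
  · have h1 := PySem.Int.mod_nonneg a h; have h2 := PySem.Int.mod_lt a h; omega

def euclid (a b : Int) : Int :=
  if _h : b = 0 then a else euclid b (PySem.Int.mod a b)
termination_by b.natAbs
decreasing_by exact pymod_natAbs_lt a b _h

def share_alt (x : Int) (y : Int) : Bool :=
  if min x y < 2 then false
  else decide (euclid x y > 1)

-- ===== PRECONDITION & SPEC =====
def Spec_share (x : Int) (y : Int) (out : Bool) : Prop := out = share_alt x y
instance (x : Int) (y : Int) (out : Bool) : Decidable (Spec_share x y out) := by unfold Spec_share; infer_instance

-- ===== CLAIM (what is proved, stated in full; the proofs are below) =====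
def Claim_equal_share : Prop := ∀ (x : Int) (y : Int), Dom_share x y → Spec_share x y (share x y)

-- ===== LEMMAS AND PROOFS =====

-- A's scanning loop is an existential over the list
theorem shareScan_eq_any (x y : Int) (l : List Int) :
    shareScan x y l = l.any (fun i => decide (PySem.Int.mod x i = 0 ∧ PySem.Int.mod y i = 0)) := by
  induction l with
  | nil => rfl
  | cons i rest ih =>
    simp only [shareScan, List.any_cons]
    split_ifs with h <;> simp [h, ih]

-- the Euclidean loop computes gcd on nonnegative inputs
theorem euclid_eq_gcd (a b : Int) (ha : 0 ≤ a) (hb : 0 ≤ b) :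
    euclid a b = (Int.gcd a b : Int) := by
  by_cases h0 : b = 0
  · subst h0
    rw [euclid]
    simp [Int.gcd, Int.natAbs_of_nonneg ha]
  · have hbpos : 0 < b := lt_of_le_of_ne hb (Ne.symm h0)
    rw [euclid, dif_neg h0]
    rw [PySem.Int.mod_eq_emod_of_pos hbpos]
    have hmlt : a % b < b := Int.emod_lt_of_pos a hbpos
    have hmnn : 0 ≤ a % b := Int.emod_nonneg a h0
    rw [euclid_eq_gcd b (a % b) hb hmnn]
    rw [Int.gcd_comm b (a % b), Int.gcd_emod a b]
termination_by b.natAbs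
decreasing_by omega

-- the existential over [2, m] (m one of the two arguments, the smaller branch) is gcd > 1
theorem exists_common_divisor_iff (x y m : Int) (hx : 2 ≤ x) (hy : 2 ≤ y)
    (hm : m = x ∨ m = y) :
    ((PySem.List.pyRange 2 (m + 1) 1).any
        (fun i => decide (PySem.Int.mod x i = 0 ∧ PySem.Int.mod y i = 0)) = true)
      ↔ 1 < (Int.gcd x y : Int) := by
  rw [List.any_eq_true]
  constructor
  · rintro ⟨i, hi, hdvd⟩
    rw [PySem.List.mem_pyRange_one] at hi
    simp only [decide_eq_true_eq] at hdvd
    rw [PySem.Int.mod_eq_zero_iff_dvd, PySem.Int.mod_eq_zero_iff_dvd] at hdvd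
    have hnat : i.natAbs ∣ Int.gcd x y := by
      rw [Int.gcd]
      exact Nat.dvd_gcd (Int.natAbs_dvd_natAbs.mpr hdvd.1) (Int.natAbs_dvd_natAbs.mpr hdvd.2)
    have hg : i ∣ (Int.gcd x y : Int) := Int.natAbs_dvd.mp (Int.natCast_dvd_natCast.mpr hnat)
    have hgpos : 0 < (Int.gcd x y : Int) := by
      have hx0 : x ≠ 0 := by omega
      exact_mod_cast Int.gcd_pos_of_ne_zero_left y hx0
    have := Int.le_of_dvd hgpos hg
    omega
  · intro hg
    refine ⟨(Int.gcd x y : Int), ?_, ?_⟩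
    · rw [PySem.List.mem_pyRange_one]
      have h1 : (Int.gcd x y : Int) ∣ x := Int.gcd_dvd_left x y
      have h2 : (Int.gcd x y : Int) ∣ y := Int.gcd_dvd_right x y
      have hx' := Int.le_of_dvd (by omega) h1
      have hy' := Int.le_of_dvd (by omega) h2
      rcases hm with rfl | rfl <;> omega
    · simp only [decide_eq_true_eq]
      rw [PySem.Int.mod_eq_zero_iff_dvd, PySem.Int.mod_eq_zero_iff_dvd]
      exact ⟨Int.gcd_dvd_left x y, Int.gcd_dvd_right x y⟩

-- ===== VERDICT (by name: the statement is the Claim_ definition above) =====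
theorem share_spec : Claim_equal_share := by
  intro x y _
  unfold Spec_share share share_alt
  by_cases hsm : x < 2 ∨ y < 2
  · rw [if_pos (min_lt_iff.mpr hsm)]
    split_ifs with hxy <;>
      [rw [PySem.List.pyRange_one_eq_nil (by omega)];
       rw [PySem.List.pyRange_one_eq_nil (by omega)]] <;> rfl
  · have hx : 2 ≤ x := by omega
    have hy : 2 ≤ y := by omega
    rw [if_neg (show ¬ min x y < 2 by rw [min_lt_iff]; omega)]
    rw [euclid_eq_gcd x y (by omega) (by omega)]
    split_ifs with hxy
    · rw [shareScan_eq_any]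
      have hiff := exists_common_divisor_iff x y y hx hy (Or.inr rfl)
      rw [Bool.eq_iff_iff, decide_eq_true_iff]
      exact hiff
    · rw [shareScan_eq_any]
      have hiff := exists_common_divisor_iff x y x hx hy (Or.inl rfl)
      rw [Bool.eq_iff_iff, decide_eq_true_iff]
      exact hiff
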